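-- pv_equiv track=rewrite | github.com/rda12345/Puzzles | house_damage_puzzle.py | find_non_special
-- ===== SOURCE A (Python) =====
-- def find_non_special(l):
--     ''' Returns the index of the non-special element closest to the middle of
--         of the list.
--         If the function is given a list of tuples, the compare operation only
--         compares the first element which is the number of bricks.
--     '''
--     ns_indicies = []
--     L = len(l)
--     for i in range(len(l)-1):
--         if l[i+1] < l[i]:
--             ns_indicies.append(i)
--     if len(ns_indicies) == 0:
--         return None
--     diff = [abs(x-L//2) for x in ns_indicies]
--     ind_min = diff.index(min(diff))
--     return ns_indicies[ind_min]
-- ===== SOURCE B (Python) =====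
-- def find_non_special(l):
--     ''' Returns the index of the non-special element closest to the middle of
--         of the list.
--         Outward search from the middle: probe i = m, m-1, m+1, m-2, m+2, ...
--         and return the FIRST valid descent position found; probing the left
--         candidate before the right one at each distance keeps the leftmost
--         on ties, so nothing is collected and no argmin rescan is needed.
--     '''
--     L = len(l)
--     m = L // 2
--     for d in range(max(m, L - 2 - m) + 1):
--         i = m - d
--         if i >= 0 and i <= L - 2 and l[i + 1] < l[i]:
--             return i
--         j = m + d
--         if d > 0 and j <= L - 2 and l[j + 1] < l[j]:
--             return j
--     return None
-- ===== Notes on version B (the rewrite author's own statement) =====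
-- stated objective: alternative
-- what changed: Replaced collect-all-descents-then-argmin-by-distance by an outward probe from the middle index (m, m-1, m+1, m-2, m+2, ...) that returns the first valid descent position found, probing left before right at each distance so the leftmost wins ties; it builds no lists and exits early.
import Mathlib
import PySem

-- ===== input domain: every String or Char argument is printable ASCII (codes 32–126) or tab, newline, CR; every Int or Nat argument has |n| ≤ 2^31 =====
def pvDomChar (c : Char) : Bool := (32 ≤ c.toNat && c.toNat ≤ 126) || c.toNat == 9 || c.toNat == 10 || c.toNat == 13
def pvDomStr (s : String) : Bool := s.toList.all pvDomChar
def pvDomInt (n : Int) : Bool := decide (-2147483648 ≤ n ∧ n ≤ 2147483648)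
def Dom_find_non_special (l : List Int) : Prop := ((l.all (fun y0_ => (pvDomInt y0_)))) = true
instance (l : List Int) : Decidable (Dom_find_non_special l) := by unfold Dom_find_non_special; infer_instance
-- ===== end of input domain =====

-- B replaces A's collect-all-descents-then-argmin structure by an outward probe from the
-- middle index (m, m-1, m+1, m-2, m+2, ...) returning the first valid descent found
-- (left before right keeps the leftmost on ties); no intermediate lists, early exit.


-- ===== PORT A =====
-- indices i and i+1 are always in range (0 ≤ i < len-1), so pyGetD is exact here
def find_non_special (l : List Int) : Option Int :=
  let L : Int := (l.length : Int)
  let ns := (PySem.List.pyRange 0 (L - 1) 1).foldl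
    (fun acc i =>
      if PySem.List.pyGetD l (i + 1) 0 < PySem.List.pyGetD l i 0 then acc ++ [i] else acc) []
  if ns.length = 0 then none
  else
    let diff := ns.map (fun x => |x - PySem.Int.floordiv L 2|)
    match PySem.List.min? diff (fun x => x) with
    | none => none          -- unreachable: diff nonempty
    | some m =>
      match PySem.List.index? diff m with
      | none => none        -- unreachable: min is a member
      | some ind => PySem.List.pyGet? ns (ind : Int)

-- ===== PORT B =====
-- probes are guarded by 0 ≤ i ≤ L-2 before any access, so pyGetD is exact here
def pvAltLoop (l : List Int) (L m : Int) : List Int → Option Int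
  | [] => none
  | d :: ds =>
    if 0 ≤ m - d ∧ m - d ≤ L - 2 ∧
        PySem.List.pyGetD l (m - d + 1) 0 < PySem.List.pyGetD l (m - d) 0 then
      some (m - d)
    else if 0 < d ∧ m + d ≤ L - 2 ∧
        PySem.List.pyGetD l (m + d + 1) 0 < PySem.List.pyGetD l (m + d) 0 then
      some (m + d)
    else pvAltLoop l L m ds

def find_non_special_alt (l : List Int) : Option Int :=
  let L : Int := (l.length : Int)
  let m : Int := PySem.Int.floordiv L 2
  pvAltLoop l L m (PySem.List.pyRange 0 (max m (L - 2 - m) + 1) 1)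

-- ===== PRECONDITION & SPEC =====
def Spec_find_non_special (l : List Int) (out : Option Int) : Prop := out = find_non_special_alt l
instance (l : List Int) (out : Option Int) : Decidable (Spec_find_non_special l out) := by unfold Spec_find_non_special; infer_instance

-- ===== CLAIM (what is proved, stated in full; the proofs are below) =====
def Claim_equal_find_non_special : Prop := ∀ (l : List Int), Dom_find_non_special l → Spec_find_non_special l (find_non_special l)

-- ===== LEMMAS AND PROOFS =====

-- descent position: valid index i with l[i+1] < l[i]
def pvDesc (l : List Int) (L i : Int) : Prop :=
  0 ≤ i ∧ i ≤ L - 2 ∧ PySem.List.pyGetD l (i + 1) 0 < PySem.List.pyGetD l i 0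

-- lexicographic "closer to the middle, leftmost on ties" order
def pvLexLe (f : Int → Int) (a b : Int) : Prop := f a < f b ∨ (f a = f b ∧ a ≤ b)

-- first argmin of f on b :: ds (leftmost wins on ties)
def pvArgm (f : Int → Int) : Int → List Int → Int
  | b, [] => b
  | b, x :: xs => if f x < f b then pvArgm f x xs else pvArgm f b xs

lemma pvArgm_spec (f : Int → Int) : ∀ (xs : List Int) (b : Int), (b :: xs).Pairwise (· < ·) →
    pvArgm f b xs ∈ b :: xs ∧ ∀ x ∈ b :: xs, pvLexLe f (pvArgm f b xs) x := by
  intro xs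
  induction xs with
  | nil =>
    intro b _
    refine ⟨by simp [pvArgm], ?_⟩
    intro x hx
    simp only [List.mem_singleton] at hx
    subst hx
    simp [pvArgm, pvLexLe]
  | cons y ys ih =>
    intro b hpw
    rw [List.pairwise_cons] at hpw
    obtain ⟨hb, hpw1⟩ := hpw
    by_cases hxy : f y < f b
    · obtain ⟨hmem, hmin⟩ := ih y hpw1
      constructor
      · simp only [pvArgm, if_pos hxy]
        exact List.mem_cons_of_mem _ hmem
      · intro x hx
        simp only [pvArgm, if_pos hxy]
        rcases List.mem_cons.mp hx with hxb | hx'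
        · subst hxb
          have h1 := hmin y (by simp)
          unfold pvLexLe at h1 ⊢
          left; omega
        · exact hmin x hx'
    · have hpwb : (b :: ys).Pairwise (· < ·) := by
        rw [List.pairwise_cons]
        rw [List.pairwise_cons] at hpw1
        exact ⟨fun a ha => hb a (List.mem_cons_of_mem _ ha), hpw1.2⟩
      obtain ⟨hmem, hmin⟩ := ih b hpwb
      constructor
      · simp only [pvArgm, if_neg hxy]
        rcases List.mem_cons.mp hmem with h | h
        · rw [h]; simp
        · exact List.mem_cons_of_mem _ (List.mem_cons_of_mem _ h)
      · intro x hx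
        simp only [pvArgm, if_neg hxy]
        rcases List.mem_cons.mp hx with hxb | hx'
        · subst hxb; exact hmin _ (by simp)
        · rcases List.mem_cons.mp hx' with hxy' | hx''
          · subst hxy'
            have hrb := hmin b (by simp)
            unfold pvLexLe at hrb ⊢
            by_cases hcase : f (pvArgm f b ys) < f x
            · left; exact hcase
            · right
              have hr_eq_b : pvArgm f b ys = b := by
                rcases List.mem_cons.mp hmem with h | h
                · exact h
                · exfalso
                  rw [List.pairwise_cons] at hpwb
                  have hby := hpwb.1 _ h
                  omega
              rw [hr_eq_b]
              have hbx := hb x (by simp)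
              rw [hr_eq_b] at hrb hcase
              constructor
              · omega
              · omega
          · exact hmin x (List.mem_cons_of_mem _ hx'')

-- first index of the minimum in A's diff list picks pvArgm (leftmost argmin)
lemma pvIndexGet (f : Int → Int) : ∀ (rest : List Int) (d : Int),
    (match PySem.List.index? ((d :: rest).map f) ((rest.map f).foldl min (f d)) with
     | none => none
     | some k => PySem.List.pyGet? (d :: rest) (k : Int)) = some (pvArgm f d rest) := by
  intro rest
  induction rest with
  | nil =>
    intro d
    simp [pvArgm]
  | cons x xs ih =>
    intro d
    have hM : ((x :: xs).map f).foldl min (f d) = (xs.map f).foldl min (min (f d) (f x)) := by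
      simp [List.foldl_cons]
    by_cases hx : f x < f d
    · have hmin : min (f d) (f x) = f x := by omega
      have hMle : (xs.map f).foldl min (f x) ≤ f x := (PySem.List.foldl_min_le (xs.map f) (f x)).1
      have hne : f d ≠ (xs.map f).foldl min (f x) := by omega
      rw [hM, hmin]
      rw [show ((d :: x :: xs).map f) = f d :: ((x :: xs).map f) by simp]
      rw [PySem.List.index?_cons_of_ne _ hne]
      have := ih x
      cases hidx : PySem.List.index? ((x :: xs).map f) ((xs.map f).foldl min (f x)) with
      | none => rw [hidx] at this; simp at this
      | some k =>
        rw [hidx] at this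
        simp only [Option.map_some]
        have hcast : ((k + 1 : Nat) : Int) = (k : Int) + 1 := by push_cast; ring
        rw [hcast, PySem.List.pyGet?_cons_succ]
        simpa [pvArgm, hx] using this
    · have hmin : min (f d) (f x) = f d := by omega
      have hfd : f d ≤ f x := by omega
      rw [hM, hmin]
      have hMle : (xs.map f).foldl min (f d) ≤ f d := (PySem.List.foldl_min_le (xs.map f) (f d)).1
      by_cases hd : f d = (xs.map f).foldl min (f d)
      · rw [show ((d :: x :: xs).map f) = f d :: ((x :: xs).map f) by simp]
        rw [← hd, PySem.List.index?_cons_self]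
        have := ih d
        rw [show ((d :: xs).map f) = f d :: (xs.map f) by simp, ← hd,
          PySem.List.index?_cons_self] at this
        simpa [pvArgm, hx] using this
      · have hlt : (xs.map f).foldl min (f d) < f d := lt_of_le_of_ne hMle (fun h => hd h.symm)
        have hnex : f x ≠ (xs.map f).foldl min (f d) := by omega
        have hned : f d ≠ (xs.map f).foldl min (f d) := hd
        rw [show ((d :: x :: xs).map f) = f d :: f x :: (xs.map f) by simp]
        rw [PySem.List.index?_cons_of_ne _ hned, PySem.List.index?_cons_of_ne _ hnex]
        have := ih d
        rw [show ((d :: xs).map f) = f d :: (xs.map f) by simp,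
          PySem.List.index?_cons_of_ne _ hned] at this
        cases hidx : PySem.List.index? (xs.map f) ((xs.map f).foldl min (f d)) with
        | none => rw [hidx] at this; simp at this
        | some k =>
          rw [hidx] at this
          simp only [Option.map_some] at this ⊢
          have h1 : ((k + 1 : Nat) : Int) = (k : Int) + 1 := by push_cast; ring
          have h2 : ((k + 1 + 1 : Nat) : Int) = ((k + 1 : Nat) : Int) + 1 := by push_cast; ring
          rw [h2, PySem.List.pyGet?_cons_succ, h1, PySem.List.pyGet?_cons_succ]
          rw [h1, PySem.List.pyGet?_cons_succ] at this
          simpa [pvArgm, hx] using this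

-- A computed as: the leftmost argmin of the middle-distance over its descent list
lemma pvA_eq (l : List Int) :
    find_non_special l =
      (match (PySem.List.pyRange 0 ((l.length : Int) - 1) 1).filter
          (fun i => decide (PySem.List.pyGetD l (i + 1) 0 < PySem.List.pyGetD l i 0)) with
        | [] => none
        | d :: rest =>
            some (pvArgm (fun i => |i - PySem.Int.floordiv (l.length : Int) 2|) d rest)) := by
  unfold find_non_special
  simp only []
  set L : Int := (l.length : Int) with hL
  set f : Int → Int := fun i => |i - PySem.Int.floordiv L 2| with hf
  rw [PySem.List.foldl_append_ite_eq_filter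
    (p := fun i => PySem.List.pyGetD l (i + 1) 0 < PySem.List.pyGetD l i 0)]
  simp only [List.nil_append]
  generalize (PySem.List.pyRange 0 (L - 1) 1).filter
    (fun i => decide (PySem.List.pyGetD l (i + 1) 0 < PySem.List.pyGetD l i 0)) = ds
  cases ds with
  | nil => simp
  | cons d rest =>
    simp only [List.length_cons]
    rw [if_neg (by omega)]
    rw [show ((d :: rest).map f) = f d :: (rest.map f) by simp]
    rw [PySem.List.min?_id_cons]
    have := pvIndexGet f rest d
    simp only [List.map_cons] at this
    exact this

-- if there is no descent at all, B's probe loop finds nothing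
lemma pvAltLoop_none (l : List Int) (L m : Int) (hm : 0 ≤ m)
    (h : ∀ i, ¬ pvDesc l L i) : ∀ ds, pvAltLoop l L m ds = none := by
  intro ds
  induction ds with
  | nil => rfl
  | cons d rest ih =>
    have hng1 : ¬ (0 ≤ m - d ∧ m - d ≤ L - 2 ∧
        PySem.List.pyGetD l (m - d + 1) 0 < PySem.List.pyGetD l (m - d) 0) := by
      intro hg; exact h (m - d) ⟨hg.1, hg.2.1, hg.2.2⟩
    have hng2 : ¬ (0 < d ∧ m + d ≤ L - 2 ∧
        PySem.List.pyGetD l (m + d + 1) 0 < PySem.List.pyGetD l (m + d) 0) := by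
      intro hg; exact h (m + d) ⟨by omega, hg.2.1, hg.2.2⟩
    simp only [pvAltLoop]
    rw [if_neg hng1, if_neg hng2]
    exact ih

-- if a is the closest-to-middle (leftmost on ties) descent, the outward probe returns it
lemma pvAltLoop_some (l : List Int) (L m a : Int) (hm : 0 ≤ m)
    (hPa : pvDesc l L a) (hmin : ∀ j, pvDesc l L j → pvLexLe (fun i => |i - m|) a j) :
    ∀ (n : Nat) (d0 : Int), 0 ≤ d0 → d0 ≤ |a - m| → |a - m| < d0 + n →
      pvAltLoop l L m (PySem.List.pyRange d0 (d0 + (n : Int)) 1) = some a := by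
  intro n
  induction n with
  | zero =>
    intro d0 h0 h1 h2
    exfalso
    push_cast at h2
    generalize hA : |a - m| = A at h1 h2
    omega
  | succ n ih =>
    intro d0 h0 h1 h2
    rw [PySem.List.pyRange_one_cons (by push_cast; omega)]
    simp only [pvAltLoop]
    have habs1 : |m - d0 - m| = d0 := by
      rw [show m - d0 - m = -d0 by ring, abs_neg, abs_of_nonneg h0]
    have habs2 : |m + d0 - m| = d0 := by
      rw [show m + d0 - m = d0 by ring, abs_of_nonneg h0]
    by_cases heq : |a - m| = d0
    · by_cases hle : a ≤ m
      · have habs : |a - m| = -(a - m) := abs_of_nonpos (by omega)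
        have ha : m - d0 = a := by omega
        rw [ha]
        rw [if_pos ⟨hPa.1, hPa.2.1, hPa.2.2⟩]
      · have habs : |a - m| = a - m := abs_of_nonneg (by omega)
        have hd0 : 0 < d0 := by omega
        have ha : m + d0 = a := by omega
        have hng1 : ¬ (0 ≤ m - d0 ∧ m - d0 ≤ L - 2 ∧
            PySem.List.pyGetD l (m - d0 + 1) 0 < PySem.List.pyGetD l (m - d0) 0) := by
          intro hg
          have h' := hmin (m - d0) ⟨hg.1, hg.2.1, hg.2.2⟩
          simp only [pvLexLe] at h'
          rw [habs1, heq] at h'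
          omega
        rw [if_neg hng1, ha]
        rw [if_pos ⟨hd0, hPa.2.1, hPa.2.2⟩]
    · have hlt : d0 < |a - m| := by
        generalize hA : |a - m| = A at h1 heq
        omega
      have hng1 : ¬ (0 ≤ m - d0 ∧ m - d0 ≤ L - 2 ∧
          PySem.List.pyGetD l (m - d0 + 1) 0 < PySem.List.pyGetD l (m - d0) 0) := by
        intro hg
        have h' := hmin (m - d0) ⟨hg.1, hg.2.1, hg.2.2⟩
        simp only [pvLexLe] at h'
        rw [habs1] at h'
        generalize hA : |a - m| = A at h' hlt
        omega
      have hng2 : ¬ (0 < d0 ∧ m + d0 ≤ L - 2 ∧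
          PySem.List.pyGetD l (m + d0 + 1) 0 < PySem.List.pyGetD l (m + d0) 0) := by
        intro hg
        have h' := hmin (m + d0) ⟨by omega, hg.2.1, hg.2.2⟩
        simp only [pvLexLe] at h'
        rw [habs2] at h'
        generalize hA : |a - m| = A at h' hlt
        omega
      rw [if_neg hng1, if_neg hng2]
      rw [show d0 + ((n + 1 : Nat) : Int) = (d0 + 1) + (n : Int) by push_cast; ring]
      refine ih (d0 + 1) (by omega) ?_ ?_
      · generalize hA : |a - m| = A at hlt; omega
      · generalize hA : |a - m| = A at h2 ⊢; push_cast at h2; omega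

-- ===== VERDICT (by name: the statement is the Claim_ definition above) =====
theorem find_non_special_spec : Claim_equal_find_non_special := by
  intro l _
  unfold Spec_find_non_special
  rw [pvA_eq]
  have hrfl : find_non_special_alt l
      = pvAltLoop l (l.length : Int) (PySem.Int.floordiv (l.length : Int) 2)
          (PySem.List.pyRange 0
            (max (PySem.Int.floordiv (l.length : Int) 2)
              ((l.length : Int) - 2 - PySem.Int.floordiv (l.length : Int) 2) + 1) 1) := rfl
  rw [hrfl]
  set L : Int := (l.length : Int) with hL
  set m : Int := PySem.Int.floordiv L 2 with hm
  have hL0 : 0 ≤ L := by rw [hL]; exact Int.natCast_nonneg _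
  have hm0 : 0 ≤ m := by
    rw [hm, PySem.Int.floordiv_eq_ediv_of_pos (by norm_num)]
    exact Int.ediv_nonneg hL0 (by norm_num)
  set M : Int := max m (L - 2 - m) with hM
  have hM1 := le_max_left m (L - 2 - m)
  have hM2 := le_max_right m (L - 2 - m)
  rw [← hM] at hM1 hM2
  have hmem : ∀ j, j ∈ (PySem.List.pyRange 0 (L - 1) 1).filter
      (fun i => decide (PySem.List.pyGetD l (i + 1) 0 < PySem.List.pyGetD l i 0)) ↔
      pvDesc l L j := by
    intro j
    simp only [List.mem_filter, PySem.List.mem_pyRange_one, decide_eq_true_eq, pvDesc]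
    constructor
    · rintro ⟨⟨h1, h2⟩, h3⟩; exact ⟨h1, by omega, h3⟩
    · rintro ⟨h1, h2, h3⟩; exact ⟨⟨h1, by omega⟩, h3⟩
  have hpw : ((PySem.List.pyRange 0 (L - 1) 1).filter
      (fun i => decide (PySem.List.pyGetD l (i + 1) 0 < PySem.List.pyGetD l i 0))).Pairwise
      (· < ·) := (PySem.List.pairwise_lt_pyRange_one 0 (L - 1)).filter _
  cases hns : (PySem.List.pyRange 0 (L - 1) 1).filter
      (fun i => decide (PySem.List.pyGetD l (i + 1) 0 < PySem.List.pyGetD l i 0)) with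
  | nil =>
    show (none : Option Int) = _
    refine (pvAltLoop_none l L m hm0 ?_ _).symm
    intro i hi
    have h' := (hmem i).mpr hi
    rw [hns] at h'
    simp at h'
  | cons d rest =>
    rw [hns] at hpw
    obtain ⟨hamem, hamin⟩ := pvArgm_spec (fun i => |i - m|) rest d hpw
    have hPa : pvDesc l L (pvArgm (fun i => |i - m|) d rest) := by
      rw [hns] at hmem
      exact (hmem _).mp hamem
    have hmin' : ∀ j, pvDesc l L j → pvLexLe (fun i => |i - m|) (pvArgm (fun i => |i - m|) d rest) j := by
      intro j hj
      rw [hns] at hmem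
      exact hamin j ((hmem j).mpr hj)
    obtain ⟨ha0, haL, hdesc⟩ := hPa
    have hfa : |pvArgm (fun i => |i - m|) d rest - m| ≤ M := by
      refine abs_le.mpr ⟨by omega, by omega⟩
    have hfin := pvAltLoop_some l L m (pvArgm (fun i => |i - m|) d rest) hm0
      ⟨ha0, haL, hdesc⟩ hmin' (M + 1).toNat 0 le_rfl (abs_nonneg _)
      (by generalize hA : |pvArgm (fun i => |i - m|) d rest - m| = A at hfa ⊢; omega)
    rw [show (0 : Int) + (((M + 1).toNat : Nat) : Int) = M + 1 by omega] at hfin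
    exact hfin.symm
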